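-- pv_equiv track=rewrite | github.com/wbkdef/CodeSamples | bk_general_libs/bk_itertools.py | _tail
-- ===== SOURCE A (Python) =====
-- import typing as tp
-- import itertools as it
-- from typing import Union, List, Tuple, Dict, Sequence, Iterable, TypeVar, Any, Callable, Sized, NamedTuple, Optional
-- import collections
--
-- T = tp.TypeVar('T')
--
-- def _tail(inp: Iterable[T], num_from_each_tail=int)  ->  Tuple[List[T], int]:
--     """Returns "num_from_each_tail" items from the end of "inp", and the number of items omitted before that
--     """
--     assert num_from_each_tail >= 0
--     iterable = iter(inp)
--     res = collections.deque(it.islice(iterable, 0, num_from_each_tail))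
--     res
--     num_omitted = 0
--     for x in iterable:
--         res.append(x)
--         res.popleft()
--         num_omitted += 1
--     return list(res), num_omitted
-- ===== SOURCE B (Python) =====
-- def _tail(inp, num_from_each_tail=int):
--     """Returns "num_from_each_tail" items from the end of "inp", and the number of items omitted before that
--     """
--     assert num_from_each_tail >= 0
--     items = list(inp)
--     start = max(len(items) - num_from_each_tail, 0)
--     return items[start:], start
-- ===== Notes on version B (the rewrite author's own statement) =====
-- stated objective: simpler
-- what changed: B materialises the iterable once and returns items[max(n-k,0):] with the omitted count computed by closed-form arithmetic, replacing A's deque sliding-window with per-element append/popleft and an incrementing counter.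
import Mathlib
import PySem

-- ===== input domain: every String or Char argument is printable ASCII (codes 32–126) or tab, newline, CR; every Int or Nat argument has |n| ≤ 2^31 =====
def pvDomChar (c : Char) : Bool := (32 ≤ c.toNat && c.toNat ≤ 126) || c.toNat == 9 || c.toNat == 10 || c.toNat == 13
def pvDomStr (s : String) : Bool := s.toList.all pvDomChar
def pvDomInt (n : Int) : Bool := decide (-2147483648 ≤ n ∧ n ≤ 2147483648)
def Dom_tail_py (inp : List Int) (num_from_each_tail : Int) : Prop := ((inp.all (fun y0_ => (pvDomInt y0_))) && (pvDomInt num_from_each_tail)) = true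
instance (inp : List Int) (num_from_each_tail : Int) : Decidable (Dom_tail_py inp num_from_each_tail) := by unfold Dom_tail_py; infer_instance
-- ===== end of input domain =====

-- B replaces A's deque sliding-window loop with one list materialisation, a closed-form
-- omitted count max(n-k,0) and a single slice (objective: simpler).

-- ===== PORT A =====
-- A: res = deque(islice(it, 0, k)); then for each remaining x: append, popleft, count += 1.
def tail_py (inp : List Int) (num_from_each_tail : Int) : List Int × Int :=
  let res := inp.take num_from_each_tail.toNat          -- islice(iterable, 0, k)
  let rest := inp.drop num_from_each_tail.toNat         -- what remains of the iterator
  rest.foldl (fun (s : List Int × Int) x => ((s.1 ++ [x]).drop 1, s.2 + 1)) (res, 0)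

-- ===== PORT B =====
def tail_py_alt (inp : List Int) (num_from_each_tail : Int) : List Int × Int :=
  let start := max ((inp.length : Int) - num_from_each_tail) 0
  (inp.drop start.toNat, start)

-- ===== PRECONDITION & SPEC =====
-- A's `assert num_from_each_tail >= 0` raises AssertionError for negative k; exactly those inputs are excluded.
def Pre_tail_py (_inp : List Int) (num_from_each_tail : Int) : Prop := 0 ≤ num_from_each_tail
instance (inp : List Int) (num_from_each_tail : Int) : Decidable (Pre_tail_py inp num_from_each_tail) := by unfold Pre_tail_py; infer_instance
def pvWitness_tail_py : List Int × Int := ([1, 2, 3], 2)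

def Spec_tail_py (inp : List Int) (num_from_each_tail : Int) (out : List Int × Int) : Prop := out = tail_py_alt inp num_from_each_tail
instance (inp : List Int) (num_from_each_tail : Int) (out : List Int × Int) : Decidable (Spec_tail_py inp num_from_each_tail out) := by unfold Spec_tail_py; infer_instance

-- ===== CLAIM (what is proved, stated in full; the proofs are below) =====
def Claim_equal_tail_py : Prop := ∀ (inp : List Int) (num_from_each_tail : Int), Dom_tail_py inp num_from_each_tail → Pre_tail_py inp num_from_each_tail → Spec_tail_py inp num_from_each_tail (tail_py inp num_from_each_tail)

-- ===== LEMMAS AND PROOFS =====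

-- The sliding loop: starting from (q, c), consuming l yields the last |q| items of q ++ l
-- and c + |l|.
theorem tail_fold_char (l q : List Int) (c : Int) :
    l.foldl (fun (s : List Int × Int) x => ((s.1 ++ [x]).drop 1, s.2 + 1)) (q, c)
      = ((q ++ l).drop l.length, c + l.length) := by
  induction l generalizing q c with
  | nil => simp
  | cons x l ih =>
      simp only [List.foldl_cons, ih, Prod.mk.injEq]
      refine ⟨?_, ?_⟩
      · have h1 : List.drop 1 (q ++ [x]) ++ l = List.drop 1 ((q ++ [x]) ++ l) :=
          (List.drop_append_of_le_length (by simp)).symm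
        have h2 : q ++ x :: l = (q ++ [x]) ++ l := by simp
        rw [h1, List.drop_drop, h2]
        congr 1
        simp [Nat.add_comm]
      · simp only [List.length_cons]
        push_cast
        ring

theorem tail_py_spec : Claim_equal_tail_py := by
  intro inp k _ hk
  have hk' : 0 ≤ k := hk
  unfold Spec_tail_py tail_py tail_py_alt
  simp only []
  rw [tail_fold_char]
  have hlen : (inp.drop k.toNat).length = inp.length - k.toNat := by simp
  rw [Prod.mk.injEq]
  refine ⟨?_, ?_⟩
  · rw [List.take_append_drop, hlen]
    congr 1
    omega
  · rw [hlen]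
    have h1 : (max ((inp.length : Int) - k) 0) = ((inp.length - k.toNat : Nat) : Int) := by omega
    rw [h1]
    ring
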